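-- pv_equiv track=rewrite | github.com/PasqM/RGTProb | RGTProb.py | T_calc
-- ===== SOURCE A (Python) =====
-- def T_calc(Tree): #calculates the vector LRd (Leaves-Root distance) vector indicating the number of nodes separating the leaves from the root
-- 	n=0
-- 	LdR=[]
-- 	for i in range(len(Tree)):
-- 		if Tree[i]=='(':
-- 			n=n+1
-- 		if Tree[i]==')':
-- 			n=n-1
-- 		LdR.append(n)
-- 	return LdR
-- ===== SOURCE B (Python) =====
-- def T_calc(Tree):
--     # Build the depth vector back-to-front: start from the total
--     # depth (known in closed form from the paren counts) and undo
--     # each character's effect while scanning the string in reverse.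
--     n = Tree.count('(') - Tree.count(')')
--     out = []
--     for c in reversed(Tree):
--         out.append(n)
--         if c == '(':
--             n -= 1
--         elif c == ')':
--             n += 1
--     out.reverse()
--     return out
-- ===== Notes on version B (the rewrite author's own statement) =====
-- stated objective: alternative
-- what changed: B builds the output back-to-front: it computes the final depth in closed form from the str.count of the open and close parentheses, then scans the string in reverse, emitting the known suffix value while undoing each character's delta, and reverses the built list; A scans forward maintaining a running counter.
import Mathlib
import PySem

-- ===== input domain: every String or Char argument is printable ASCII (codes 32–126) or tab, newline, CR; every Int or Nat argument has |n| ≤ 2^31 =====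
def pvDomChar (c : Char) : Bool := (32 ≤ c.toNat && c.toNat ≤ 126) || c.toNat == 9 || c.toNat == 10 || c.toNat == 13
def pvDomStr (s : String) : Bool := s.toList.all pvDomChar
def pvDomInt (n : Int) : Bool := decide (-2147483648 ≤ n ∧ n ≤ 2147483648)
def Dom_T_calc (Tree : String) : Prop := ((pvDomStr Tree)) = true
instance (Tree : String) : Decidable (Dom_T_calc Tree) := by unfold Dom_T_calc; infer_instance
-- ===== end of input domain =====

-- B builds the depth vector back-to-front from the closed-form total (paren counts), reversing the scan; an alternative traversal order, not faster.


-- ===== PORT A =====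
-- forward loop maintaining counter n and accumulator LdR, exactly as A
def T_calc (Tree : String) : List Int :=
  (Tree.toList.foldl (fun (st : Int × List Int) c =>
    let n1 : Int := if c = '(' then st.1 + 1 else st.1
    let n2 : Int := if c = ')' then n1 - 1 else n1
    (n2, st.2 ++ [n2])) ((0 : Int), ([] : List Int))).2

-- ===== PORT B =====
-- total depth from the two counts; reverse scan, append then undo delta; final reverse
def T_calc_alt (Tree : String) : List Int :=
  let n0 : Int := (Tree.toList.count '(' : Int) - (Tree.toList.count ')' : Int)
  ((Tree.toList.reverse.foldl (fun (st : Int × List Int) c =>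
    (if c = '(' then st.1 - 1 else if c = ')' then st.1 + 1 else st.1,
     st.2 ++ [st.1])) (n0, ([] : List Int))).2).reverse

-- ===== PRECONDITION & SPEC =====
def Spec_T_calc (Tree : String) (out : List Int) : Prop := out = T_calc_alt Tree
instance (Tree : String) (out : List Int) : Decidable (Spec_T_calc Tree out) := by unfold Spec_T_calc; infer_instance

-- ===== CLAIM (what is proved, stated in full; the proofs are below) =====
def Claim_equal_T_calc : Prop := ∀ (Tree : String), Dom_T_calc Tree → Spec_T_calc Tree (T_calc Tree)

-- ===== LEMMAS AND PROOFS =====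
def pvDelta (c : Char) : Int := if c = '(' then 1 else if c = ')' then -1 else 0

-- forward prefix sums
def pvAccum : Int → List Int → List Int
  | _, [] => []
  | s, d :: ds => (s + d) :: pvAccum (s + d) ds

-- backward emission: emit n, then continue with n - delta c
def pvRevAccum : Int → List Char → List Int
  | _, [] => []
  | n, c :: cs => n :: pvRevAccum (n - pvDelta c) cs

theorem pv_fold_accum (l : List Char) (n : Int) (acc : List Int) :
    (l.foldl (fun (st : Int × List Int) c =>
      let n1 : Int := if c = '(' then st.1 + 1 else st.1
      let n2 : Int := if c = ')' then n1 - 1 else n1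
      (n2, st.2 ++ [n2])) (n, acc)).2 = acc ++ pvAccum n (l.map pvDelta) := by
  induction l generalizing n acc with
  | nil => simp [pvAccum]
  | cons c cs ih =>
    simp only [List.foldl, List.map, pvAccum]
    rw [ih]
    by_cases h1 : c = '(' <;> by_cases h2 : c = ')' <;>
      simp_all [pvDelta, List.append_assoc, Int.sub_eq_add_neg]

theorem pv_fold_revaccum (l : List Char) (n : Int) (acc : List Int) :
    (l.foldl (fun (st : Int × List Int) c =>
      (if c = '(' then st.1 - 1 else if c = ')' then st.1 + 1 else st.1,
       st.2 ++ [st.1])) (n, acc)).2 = acc ++ pvRevAccum n l := by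
  induction l generalizing n acc with
  | nil => simp [pvRevAccum]
  | cons c cs ih =>
    simp only [List.foldl, pvRevAccum]
    rw [ih]
    by_cases h1 : c = '(' <;> by_cases h2 : c = ')' <;>
      simp_all [pvDelta, List.append_assoc, Int.sub_eq_add_neg]

theorem pv_accum_append_single (ds : List Int) (s d : Int) :
    pvAccum s (ds ++ [d]) = pvAccum s ds ++ [s + ds.sum + d] := by
  induction ds generalizing s with
  | nil => simp [pvAccum]
  | cons e es ih =>
    simp only [List.cons_append, pvAccum, ih, List.sum_cons]
    have h : s + e + es.sum + d = s + (e + es.sum) + d := by ring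
    rw [h]

theorem pv_sum_delta (l : List Char) :
    (l.map pvDelta).sum = (l.count '(' : Int) - (l.count ')' : Int) := by
  induction l with
  | nil => simp
  | cons c cs ih =>
    simp only [List.map, List.sum_cons, ih, List.count_cons]
    by_cases h1 : c = '(' <;> by_cases h2 : c = ')' <;>
      simp_all [pvDelta] <;> omega

theorem pv_revaccum_reverse (r : List Char) (n : Int) :
    (pvRevAccum n r).reverse
      = pvAccum (n - (r.map pvDelta).sum) (r.reverse.map pvDelta) := by
  induction r generalizing n with
  | nil => simp [pvRevAccum, pvAccum]
  | cons c cs ih =>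
    simp only [pvRevAccum, List.reverse_cons, List.map_append, List.map,
      List.sum_cons]
    rw [ih, pv_accum_append_single]
    congr 1
    · congr 1; ring
    · congr 1
      have h2 : ((cs.reverse.map pvDelta).sum : Int) = (cs.map pvDelta).sum := by
        rw [List.map_reverse, List.sum_reverse]
      omega

-- ===== VERDICT (by name: the statement is the Claim_ definition above) =====
theorem T_calc_spec : Claim_equal_T_calc := by
  intro Tree _
  unfold Spec_T_calc T_calc T_calc_alt
  simp only [pv_fold_accum, pv_fold_revaccum, List.nil_append,
    pv_revaccum_reverse, List.reverse_reverse, List.map_reverse,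
    List.sum_reverse, pv_sum_delta]
  congr 1
  ring
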